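-- pv_equiv track=rewrite | github.com/dcharb78/UFRFv3_LEAN4_v1 | gap_set_prime_theorem.py | compute_semigroup_gaps
-- ===== SOURCE A (Python) =====
-- from math import gcd, isqrt
--
-- def compute_semigroup_gaps(generators, up_to=None):
--     """
--     Compute the gap set (non-reachable numbers) for a numerical semigroup.
--     Returns: (gaps, frobenius, genus)
--     """
--     gens = sorted(generators)
--     g = gcd(*gens)
--     if g != 1:
--         return None, None, None
--
--     # Compute Frobenius number bound: g(a,b) = ab - a - b
--     # For multiple generators, use product - sum
--     if up_to is None:
--         up_to = gens[0] * gens[-1]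
--
--     # Dynamic programming to find reachable numbers
--     reachable = set([0])
--     for target in range(1, up_to + 1):
--         for gen in gens:
--             if target >= gen and (target - gen) in reachable:
--                 reachable.add(target)
--                 break
--
--     gaps = sorted(set(range(1, up_to + 1)) - reachable)
--     frobenius = max(gaps) if gaps else -1
--     genus = len(gaps)
--
--     return gaps, frobenius, genus
-- ===== SOURCE B (Python) =====
-- from math import gcd
--
--
-- def compute_semigroup_gaps(generators, up_to=None):
--     """Apery-set method: Bellman-Ford over residue classes mod the smallest useful
--     generator gives the least semigroup element in each class; m is a gap iff
--     m is smaller than that least element of its class."""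
--     g = 0
--     for x in generators:
--         g = gcd(g, x)
--     if g != 1:
--         return None, None, None
--
--     if up_to is None:
--         up_to = min(generators) * max(generators)
--     n = up_to if up_to > 0 else 0
--
--     pos = [x for x in generators if 0 < x <= n]
--     if not pos:
--         gaps = list(range(1, n + 1))
--         return gaps, (gaps[-1] if gaps else -1), len(gaps)
--
--     a = min(pos)
--     w = [None] * a
--     w[0] = 0
--     # a-1 relaxation rounds suffice (a shortest representative uses < a parts);
--     # stop early once a round changes nothing.
--     for _ in range(a - 1):
--         changed = False
--         for r in range(a):
--             v = w[r]
--             if v is not None: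
--                 for x in pos:
--                     r2 = (r + x) % a
--                     if w[r2] is None or v + x < w[r2]:
--                         w[r2] = v + x
--                         changed = True
--         if not changed:
--             break
--
--     gaps = [m for m in range(1, n + 1) if w[m % a] is None or m < w[m % a]]
--     frobenius = gaps[-1] if gaps else -1
--     return gaps, frobenius, len(gaps)
-- ===== Notes on version B (the rewrite author's own statement) =====
-- stated objective: faster
-- what changed: Replaces A's reachability DP over every target in [1..up_to] (per-target scan of all generators against a growing set) by the Apery-set method: Bellman-Ford relaxation over the a residue classes mod the smallest useful generator computes the least semigroup element of each class, and m is a gap iff m is below its class representative; the per-target generator scan disappears, gap enumeration becomes one arithmetic test per m.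
import Mathlib
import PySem

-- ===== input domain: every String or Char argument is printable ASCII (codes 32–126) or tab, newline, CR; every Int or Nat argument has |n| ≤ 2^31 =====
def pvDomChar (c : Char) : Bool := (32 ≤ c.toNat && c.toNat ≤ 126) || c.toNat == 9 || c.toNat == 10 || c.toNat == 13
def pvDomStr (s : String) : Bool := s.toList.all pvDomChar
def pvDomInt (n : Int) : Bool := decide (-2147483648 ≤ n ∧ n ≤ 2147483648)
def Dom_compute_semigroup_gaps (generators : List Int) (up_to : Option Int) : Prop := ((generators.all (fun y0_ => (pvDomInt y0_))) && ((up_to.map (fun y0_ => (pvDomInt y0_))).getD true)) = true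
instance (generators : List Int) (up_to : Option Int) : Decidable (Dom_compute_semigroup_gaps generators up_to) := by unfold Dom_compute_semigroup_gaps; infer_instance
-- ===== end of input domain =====

-- B replaces A's per-target reachability DP over [1..up_to] by the Apéry-set method:
-- Bellman-Ford relaxation over residue classes mod the smallest useful generator,
-- then one arithmetic test per candidate gap ("faster" in a timing run).

-- ===== PORT A =====
-- inner 'for gen in gens: ... break' of A
def pvAInner (reachable : PySem.Set Int) (target : Int) : List Int → PySem.Set Int
  | [] => reachable
  | gen :: rest =>
    if gen ≤ target ∧ PySem.Set.contains reachable (target - gen) = true then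
      PySem.Set.add reachable target
    else pvAInner reachable target rest

def compute_semigroup_gaps (generators : List Int) (up_to : Option Int) :
    Option (List Int) × Option Int × Option Int :=
  let gens := PySem.List.sorted generators (fun x => x) false
  let g : Int := gens.foldl (fun a b => ((Int.gcd a b : Nat) : Int)) 0
  if g ≠ 1 then (none, none, none)
  else
    -- g = 1 forces gens ≠ [] (the fold over [] gives 0), so gens[0]/gens[-1] never raise; getD 0 is unreachable
    let upTo : Int := match up_to with
      | none => PySem.List.pyGetD gens 0 0 * PySem.List.pyGetD gens (-1) 0
      | some u => u
    let reachable : PySem.Set Int :=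
      (PySem.List.pyRange 1 (upTo + 1) 1).foldl (fun r target => pvAInner r target gens)
        (PySem.Set.ofList [0])
    let gaps := PySem.List.sorted
      (PySem.Set.diff (PySem.Set.ofList (PySem.List.pyRange 1 (upTo + 1) 1)) reachable)
      (fun x => x) false
    let frobenius : Int := match PySem.List.max? gaps (fun x => x) with
      | some m => m
      | none => -1
    (some gaps, some frobenius, some (gaps.length : Int))

-- ===== PORT B =====
-- inner 'for x in pos:' relaxation of B, with the value v = w[r] captured before the loop
def pvBStep (a r v : Int) (st : List (Option Int) × Bool) (x : Int) : List (Option Int) × Bool :=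
  -- Python binds r2 = (r + x) % a once; it is inlined here (same value at each use)
  match PySem.List.pyGetD st.1 (PySem.Int.mod (r + x) a) none with
  | none => (PySem.List.pySetD st.1 (PySem.Int.mod (r + x) a) (some (v + x)), true)
  | some u =>
    if v + x < u then (PySem.List.pySetD st.1 (PySem.Int.mod (r + x) a) (some (v + x)), true)
    else st

-- body of 'for r in range(a):' of B
def pvBMid (a : Int) (pos : List Int) (st : List (Option Int) × Bool) (r : Int) : List (Option Int) × Bool :=
  match PySem.List.pyGetD st.1 r none with
  | none => st
  | some v => pos.foldl (pvBStep a r v) st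

-- one relaxation round of B (returns the array and the 'changed' flag)
def pvBRound (a : Int) (pos : List Int) (w : List (Option Int)) : List (Option Int) × Bool :=
  (PySem.List.pyRange 0 a 1).foldl (pvBMid a pos) (w, false)

-- 'for _ in range(a-1): ... if not changed: break' of B
def pvBRounds (a : Int) (pos : List Int) : List Int → List (Option Int) → List (Option Int)
  | [], w => w
  | _ :: rest, w =>
    let st := pvBRound a pos w
    if st.2 then pvBRounds a pos rest st.1 else st.1

def compute_semigroup_gaps_alt (generators : List Int) (up_to : Option Int) :
    Option (List Int) × Option Int × Option Int :=
  let g : Int := generators.foldl (fun a b => ((Int.gcd a b : Nat) : Int)) 0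
  if g ≠ 1 then (none, none, none)
  else
    -- g = 1 forces generators ≠ [], so min()/max() never raise; getD 0 is unreachable
    let upTo : Int := match up_to with
      | none => (PySem.List.min? generators (fun x => x)).getD 0 *
                (PySem.List.max? generators (fun x => x)).getD 0
      | some u => u
    let n : Int := if upTo > 0 then upTo else 0
    let pos := generators.filter (fun x => decide (0 < x) && decide (x ≤ n))
    if pos = [] then
      let gaps := PySem.List.pyRange 1 (n + 1) 1
      let frobenius : Int := match PySem.List.pyGet? gaps (-1) with | some m => m | none => -1
      (some gaps, some frobenius, some (gaps.length : Int))
    else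
      -- pos ≠ [], so min(pos) never raises; getD 0 is unreachable
      let a : Int := (PySem.List.min? pos (fun x => x)).getD 0
      let w0 : List (Option Int) := (List.replicate a.toNat (none : Option Int)).set 0 (some 0)
      let w := pvBRounds a pos (PySem.List.pyRange 0 (a - 1) 1) w0
      let gaps := (PySem.List.pyRange 1 (n + 1) 1).filter (fun m =>
        match PySem.List.pyGetD w (PySem.Int.mod m a) none with
        | none => true
        | some v => decide (m < v))
      let frobenius : Int := match PySem.List.pyGet? gaps (-1) with | some m => m | none => -1
      (some gaps, some frobenius, some (gaps.length : Int))

-- ===== PRECONDITION & SPEC =====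
def Spec_compute_semigroup_gaps (generators : List Int) (up_to : Option Int) (out : Option (List Int) × Option Int × Option Int) : Prop := out = compute_semigroup_gaps_alt generators up_to
instance (generators : List Int) (up_to : Option Int) (out : Option (List Int) × Option Int × Option Int) : Decidable (Spec_compute_semigroup_gaps generators up_to out) := by unfold Spec_compute_semigroup_gaps; infer_instance

-- ===== CLAIM (what is proved, stated in full; the proofs are below) =====
def Claim_equal_compute_semigroup_gaps : Prop := ∀ (generators : List Int) (up_to : Option Int), Dom_compute_semigroup_gaps generators up_to → Spec_compute_semigroup_gaps generators up_to (compute_semigroup_gaps generators up_to)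

-- ===== LEMMAS AND PROOFS =====

/-- Truth predicate both programs are proved against: `pvRep gs n` iff `n` is a sum of
positive members of `gs` (with repetition). -/
def pvRep (gs : List Int) : Nat → Bool
  | 0 => true
  | (n+1) => gs.any (fun g => if h : 0 < g ∧ g ≤ ((n : Int) + 1) then pvRep gs (n + 1 - g.toNat) else false)
  decreasing_by omega

def pvRepI (gs : List Int) (t : Int) : Bool := pvRep gs t.toNat

theorem pvRepI_zero (gs : List Int) : pvRepI gs 0 = true := by simp [pvRepI, pvRep]

theorem pvRepI_iff (gs : List Int) (t : Int) (ht : 1 ≤ t) :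
    pvRepI gs t = true ↔ ∃ g ∈ gs, 0 < g ∧ g ≤ t ∧ pvRepI gs (t - g) = true := by
  obtain ⟨n, rfl⟩ : ∃ n : Nat, t = (n : Int) + 1 := ⟨(t - 1).toNat, by omega⟩
  have htn : ((n : Int) + 1).toNat = n + 1 := by omega
  unfold pvRepI
  rw [htn]
  show pvRep gs (n + 1) = true ↔ _
  rw [pvRep, List.any_eq_true]
  constructor
  · rintro ⟨g, hg, hcond⟩
    by_cases hc : 0 < g ∧ g ≤ (n : Int) + 1
    · rw [dif_pos hc] at hcond
      refine ⟨g, hg, hc.1, hc.2, ?_⟩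
      have : ((n : Int) + 1 - g).toNat = n + 1 - g.toNat := by omega
      rw [this]
      exact hcond
    · rw [dif_neg hc] at hcond
      exact absurd hcond (by simp)
  · rintro ⟨g, hg, h1, h2, h3⟩
    refine ⟨g, hg, ?_⟩
    rw [dif_pos ⟨h1, h2⟩]
    have : ((n : Int) + 1 - g).toNat = n + 1 - g.toNat := by omega
    rw [this] at h3
    exact h3

-- ===== A-side characterization =====

theorem mem_pvAInner (gs : List Int) (r : PySem.Set Int) (t x : Int) :
    x ∈ pvAInner r t gs ↔ x ∈ r ∨ (x = t ∧ ∃ g ∈ gs, g ≤ t ∧ (t - g) ∈ r) := by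
  induction gs with
  | nil => simp [pvAInner]
  | cons g rest ih =>
    show x ∈ (if g ≤ t ∧ PySem.Set.contains r (t - g) = true then PySem.Set.add r t
        else pvAInner r t rest) ↔ _
    split_ifs with h
    · rw [PySem.Set.mem_add]
      have hmem : (t - g) ∈ r := (PySem.Set.contains_iff r (t - g)).mp h.2
      constructor
      · rintro (hx | hx)
        · exact Or.inl hx
        · exact Or.inr ⟨hx, g, List.mem_cons_self .., h.1, hmem⟩
      · rintro (hx | ⟨hx, _⟩)
        · exact Or.inl hx
        · exact Or.inr hx
    · rw [ih]
      have h' : ¬ (g ≤ t ∧ (t - g) ∈ r) := by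
        simpa [PySem.Set.contains_iff] using h
      constructor
      · rintro (hx | ⟨hx, g', hg', hcond⟩)
        · exact Or.inl hx
        · exact Or.inr ⟨hx, g', List.mem_cons_of_mem _ hg', hcond⟩
      · rintro (hx | ⟨hx, g', hg', hcond⟩)
        · exact Or.inl hx
        · rcases List.mem_cons.mp hg' with rfl | hg''
          · exact absurd hcond h'
          · exact Or.inr ⟨hx, g', hg'', hcond⟩

theorem mem_aLoop (generators : List Int) (N : Nat) : ∀ x : Int,
    x ∈ (PySem.List.pyRange 1 ((N : Int) + 1) 1).foldl
        (fun r target => pvAInner r target (PySem.List.sorted generators (fun x => x) false))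
        (PySem.Set.ofList [0])
      ↔ (x = 0 ∨ (1 ≤ x ∧ x ≤ (N : Int) ∧ pvRepI generators x = true)) := by
  induction N with
  | zero =>
    intro x
    rw [PySem.List.pyRange_one_eq_nil (by omega)]
    simp [PySem.Set.mem_ofList]
    omega
  | succ N ih =>
    intro x
    have hcast : ((N + 1 : Nat) : Int) + 1 = ((N : Int) + 1) + 1 := by push_cast; ring
    rw [hcast, PySem.List.pyRange_one_succ_right (by omega), List.foldl_append]
    simp only [List.foldl_cons, List.foldl_nil]
    rw [mem_pvAInner]
    have key : (∃ g ∈ PySem.List.sorted generators (fun x => x) false,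
        g ≤ (N : Int) + 1 ∧ ((N : Int) + 1 - g) ∈
          (PySem.List.pyRange 1 ((N : Int) + 1) 1).foldl
            (fun r target => pvAInner r target (PySem.List.sorted generators (fun x => x) false))
            (PySem.Set.ofList [0]))
        ↔ pvRepI generators ((N : Int) + 1) = true := by
      rw [pvRepI_iff generators ((N : Int) + 1) (by omega)]
      constructor
      · rintro ⟨g, hg, hgt, hmem⟩
        rw [ih] at hmem
        have hg' : g ∈ generators := (PySem.List.mem_sorted ..).mp hg
        rcases hmem with h0 | ⟨h1, h2, h3⟩
        · exact ⟨g, hg', by omega, hgt, by rw [h0]; exact pvRepI_zero _⟩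
        · exact ⟨g, hg', by omega, hgt, h3⟩
      · rintro ⟨g, hg, h0, h1, h2⟩
        refine ⟨g, (PySem.List.mem_sorted ..).mpr hg, h1, ?_⟩
        rw [ih]
        by_cases hz : (N : Int) + 1 - g = 0
        · exact Or.inl hz
        · exact Or.inr ⟨by omega, by omega, h2⟩
    rw [ih x]
    constructor
    · rintro ((h | ⟨h1, h2, h3⟩) | ⟨rfl, hex⟩)
      · exact Or.inl h
      · exact Or.inr ⟨h1, by omega, h3⟩
      · exact Or.inr ⟨by omega, by omega, key.mp hex⟩
    · rintro (h | ⟨h1, h2, h3⟩)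
      · exact Or.inl (Or.inl h)
      · by_cases hx : x ≤ (N : Int)
        · exact Or.inl (Or.inr ⟨h1, hx, h3⟩)
        · have : x = (N : Int) + 1 := by omega
          subst this
          exact Or.inr ⟨rfl, key.mpr h3⟩

theorem mem_aLoop' (generators : List Int) (T : Int) : ∀ x : Int,
    x ∈ (PySem.List.pyRange 1 (T + 1) 1).foldl
        (fun r target => pvAInner r target (PySem.List.sorted generators (fun x => x) false))
        (PySem.Set.ofList [0])
      ↔ (x = 0 ∨ (1 ≤ x ∧ x ≤ T ∧ pvRepI generators x = true)) := by
  intro x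
  by_cases hT : T ≤ 0
  · rw [PySem.List.pyRange_one_eq_nil (by omega)]
    simp [PySem.Set.mem_ofList]
    omega
  · have : T = ((T.toNat : Nat) : Int) := by omega
    rw [this]
    exact mem_aLoop generators T.toNat x

theorem sorted_filter_range (p : Int → Bool) (a b : Int) :
    PySem.List.sorted ((PySem.List.pyRange a b 1).filter p) (fun x => x) false
      = (PySem.List.pyRange a b 1).filter p :=
  PySem.List.sorted_eq_self_of_pairwise _ _
    (((PySem.List.pairwise_lt_pyRange_one a b).sublist List.filter_sublist).imp le_of_lt)

/-- A's sorted gap set is the range filtered by non-representability. -/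
theorem gapsA_eq (generators : List Int) (U : Int) :
    PySem.List.sorted
      (PySem.Set.diff (PySem.Set.ofList (PySem.List.pyRange 1 (U + 1) 1))
        ((PySem.List.pyRange 1 (U + 1) 1).foldl
          (fun r target => pvAInner r target (PySem.List.sorted generators (fun x => x) false))
          (PySem.Set.ofList [0])))
      (fun x => x) false
    = (PySem.List.pyRange 1 (U + 1) 1).filter (fun m => ! pvRepI generators m) := by
  have hdiff : ∀ (s t : PySem.Set Int),
      PySem.Set.diff s t = s.filter (fun z => !(PySem.Set.contains t z)) := fun _ _ => rfl
  rw [hdiff, PySem.Set.ofList_eq_self_of_nodup _ (PySem.List.nodup_pyRange_one 1 (U + 1))]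
  rw [sorted_filter_range]
  apply List.filter_congr
  intro x hx
  obtain ⟨hx1, hx2⟩ := (PySem.List.mem_pyRange_one ..).mp hx
  have hA : PySem.Set.contains
      ((PySem.List.pyRange 1 (U + 1) 1).foldl
        (fun r target => pvAInner r target (PySem.List.sorted generators (fun x => x) false))
        (PySem.Set.ofList [0])) x = pvRepI generators x := by
    rw [Bool.eq_iff_iff, PySem.Set.contains_iff, mem_aLoop' generators U x]
    constructor
    · rintro (h0 | ⟨_, _, h⟩)
      · omega
      · exact h
    · intro h
      exact Or.inr ⟨hx1, by omega, h⟩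
  rw [hA]

-- ===== scaffolding equalities (gcd fold, min/max vs sorted ends, last vs max) =====

theorem le_getLast_of_pairwise (l : List Int) (h : l.Pairwise (· ≤ ·)) (hne : l ≠ []) :
    ∀ a ∈ l, a ≤ l.getLast hne := by
  intro a ha
  obtain ⟨i, hi, rfl⟩ := List.mem_iff_getElem.mp ha
  rw [List.getLast_eq_getElem]
  rcases Nat.lt_or_ge i (l.length - 1) with hlt | hge
  · exact List.pairwise_iff_getElem.mp h i (l.length - 1) hi (by omega) hlt
  · have : i = l.length - 1 := by omega
    subst this
    rfl

theorem gcd_fold_sorted (generators : List Int) :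
    (PySem.List.sorted generators (fun x => x) false).foldl (fun a b => (Int.gcd a b : Int)) 0
      = generators.foldl (fun a b => (Int.gcd a b : Int)) 0 := by
  refine @List.Perm.foldl_eq _ _ _ _ _ ⟨fun b a c => ?_⟩
    (PySem.List.sorted_perm generators (fun x => x) false) 0
  show ((Int.gcd (Int.gcd b a : Int) c : Nat) : Int) = ((Int.gcd (Int.gcd b c : Int) a : Nat) : Int)
  simp only [Int.gcd, Int.natAbs_natCast]
  rw [Nat.gcd_assoc, Nat.gcd_assoc, Nat.gcd_comm a.natAbs c.natAbs]

theorem gcd_fold_ne_zero_of_nil (generators : List Int) (h : generators = []) :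
    generators.foldl (fun a b => (Int.gcd a b : Int)) 0 = 0 := by simp [h]

theorem sorted_head_min (generators : List Int) (hne : generators ≠ []) :
    PySem.List.pyGetD (PySem.List.sorted generators (fun x => x) false) 0 0
      = (PySem.List.min? generators (fun x => x)).getD 0 := by
  obtain ⟨m, t, hs⟩ : ∃ m t, PySem.List.sorted generators (fun x => x) false = m :: t := by
    rcases hsort : PySem.List.sorted generators (fun x => x) false with _ | ⟨m, t⟩
    · exact absurd ((PySem.List.sorted_eq_nil_iff ..).mp hsort) hne
    · exact ⟨m, t, rfl⟩
  obtain ⟨mm, hmm⟩ : ∃ mm, PySem.List.min? generators (fun x => x) = some mm := by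
    rcases hmin : PySem.List.min? generators (fun x => x) with _ | mm
    · exact absurd ((PySem.List.min?_eq_none_iff ..).mp hmin) hne
    · exact ⟨mm, rfl⟩
  rw [hs, hmm, PySem.List.pyGetD_zero_cons]
  have hmmem : m ∈ generators := (PySem.List.mem_sorted ..).mp (hs ▸ List.mem_cons_self ..)
  have hmin1 : ∀ y ∈ generators, m ≤ y := PySem.List.key_head_sorted_le generators _ hs
  have hmm1 : mm ∈ generators := PySem.List.min?_mem hmm
  have hmm2 : ∀ y ∈ generators, mm ≤ y := PySem.List.min?_isMin hmm
  exact le_antisymm (hmin1 mm hmm1) (hmm2 m hmmem)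

theorem sorted_last_max (generators : List Int) (hne : generators ≠ []) :
    PySem.List.pyGetD (PySem.List.sorted generators (fun x => x) false) (-1) 0
      = (PySem.List.max? generators (fun x => x)).getD 0 := by
  have hsne : PySem.List.sorted generators (fun x => x) false ≠ [] := by
    intro h
    exact hne ((PySem.List.sorted_eq_nil_iff ..).mp h)
  obtain ⟨mm, hmm⟩ : ∃ mm, PySem.List.max? generators (fun x => x) = some mm := by
    rcases hmax : PySem.List.max? generators (fun x => x) with _ | mm
    · exact absurd ((PySem.List.max?_eq_none_iff ..).mp hmax) hne
    · exact ⟨mm, rfl⟩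
  rw [hmm, PySem.List.pyGetD_neg_one _ _ hsne]
  set s := PySem.List.sorted generators (fun x => x) false with hsdef
  have hlast_mem : s.getLast hsne ∈ generators :=
    (PySem.List.mem_sorted ..).mp (List.getLast_mem hsne)
  have hpw : s.Pairwise (· ≤ ·) := PySem.List.sorted_pairwise generators (fun x => x)
  have hlast_max : ∀ y ∈ generators, y ≤ s.getLast hsne := by
    intro y hy
    exact le_getLast_of_pairwise s hpw hsne y ((PySem.List.mem_sorted ..).mpr hy)
  have hmm1 : mm ∈ generators := PySem.List.max?_mem hmm
  have hmm2 : ∀ y ∈ generators, y ≤ mm := PySem.List.max?_isMax hmm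
  simp only [Option.getD_some]
  exact le_antisymm (hmm2 _ hlast_mem) (hlast_max mm hmm1)

theorem max_eq_last (l : List Int) (hp : l.Pairwise (· < ·)) :
    PySem.List.max? l (fun x => x) = PySem.List.pyGet? l (-1) := by
  rcases l with _ | ⟨a, t⟩
  · rfl
  · have hne : (a :: t) ≠ ([] : List Int) := by simp
    obtain ⟨mm, hmm⟩ : ∃ mm, PySem.List.max? (a :: t) (fun x => x) = some mm := by
      rcases hmax : PySem.List.max? (a :: t) (fun x => x) with _ | mm
      · exact absurd ((PySem.List.max?_eq_none_iff ..).mp hmax) hne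
      · exact ⟨mm, rfl⟩
    have hget : PySem.List.pyGet? (a :: t) (-1) = some ((a :: t).getLast hne) := by
      rw [PySem.List.pyGet?_neg_ofNat (a :: t) 1 (by omega) (by simp)]
      rw [List.getElem?_eq_getElem (by simp)]
      rw [List.getLast_eq_getElem]
      rfl
    rw [hmm, hget]
    have hpw : (a :: t).Pairwise (· ≤ ·) := hp.imp (fun h => le_of_lt h)
    have h1 : mm ≤ (a :: t).getLast hne :=
      le_getLast_of_pairwise _ hpw hne mm (PySem.List.max?_mem hmm)
    have h2 : (a :: t).getLast hne ≤ mm :=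
      PySem.List.max?_isMax hmm _ (List.getLast_mem hne)
    exact congrArg some (le_antisymm h1 h2)

theorem max_eq_last_filter (p : Int → Bool) (a b : Int) :
    PySem.List.max? ((PySem.List.pyRange a b 1).filter p) (fun x => x)
      = PySem.List.pyGet? ((PySem.List.pyRange a b 1).filter p) (-1) :=
  max_eq_last _ ((PySem.List.pairwise_lt_pyRange_one a b).sublist List.filter_sublist)

-- ===== B-side: semigroup facts =====

theorem pvRepI_add (gs : List Int) (v g : Int) (hv : pvRepI gs v = true) (h0 : 0 ≤ v)
    (hg : g ∈ gs) (hgpos : 0 < g) : pvRepI gs (v + g) = true := by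
  rw [pvRepI_iff gs (v + g) (by omega)]
  exact ⟨g, hg, hgpos, by omega, by rw [show v + g - g = v by ring]; exact hv⟩

theorem pvRepI_add_mul (gs : List Int) (v a : Int) (hv : pvRepI gs v = true) (h0 : 0 ≤ v)
    (ha : a ∈ gs) (hapos : 0 < a) : ∀ t : Nat, pvRepI gs (v + t * a) = true := by
  intro t
  induction t with
  | zero => simpa using hv
  | succ t ih =>
    have : v + ((t : Int) + 1) * a = (v + t * a) + a := by ring
    rw [show ((t + 1 : Nat) : Int) = (t : Int) + 1 by push_cast; ring, this]
    exact pvRepI_add gs _ a ih (by positivity) ha hapos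

theorem sums_of_pvRepI (gs : List Int) (n : Int) : ∀ k : Nat, ∀ m : Int, m.toNat = k →
    0 ≤ m → m ≤ n → pvRepI gs m = true →
    ∃ L : List Int, (∀ y ∈ L, y ∈ gs ∧ 0 < y ∧ y ≤ n) ∧ L.sum = m := by
  intro k
  induction k using Nat.strong_induction_on with
  | _ k ih =>
    intro m hk h0 hn hrep
    by_cases hm : m = 0
    · exact ⟨[], by simp, by simp [hm]⟩
    · obtain ⟨g, hg, h1, h2, h3⟩ := (pvRepI_iff gs m (by omega)).mp hrep
      obtain ⟨L, hL, hLs⟩ := ih (m - g).toNat (by omega) (m - g) rfl (by omega) (by omega) h3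
      refine ⟨g :: L, ?_, by rw [List.sum_cons, hLs]; ring⟩
      intro y hy
      rcases List.mem_cons.mp hy with rfl | hy'
      · exact ⟨hg, h1, by omega⟩
      · exact hL y hy'

-- mod helpers (a > 0 throughout)
theorem pvMod_bounds (x a : Int) (ha : 0 < a) :
    0 ≤ PySem.Int.mod x a ∧ PySem.Int.mod x a < a :=
  ⟨PySem.Int.mod_nonneg x ha, PySem.Int.mod_lt x ha⟩

theorem pvMod_congr (a u v : Int) (ha : 0 < a) (h : a ∣ u - v) :
    PySem.Int.mod u a = PySem.Int.mod v a := by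
  rw [PySem.Int.mod_eq_emod_of_pos (a := u) ha, PySem.Int.mod_eq_emod_of_pos (a := v) ha]
  exact Int.emod_eq_emod_iff_emod_sub_eq_zero.mpr (Int.emod_eq_zero_of_dvd h)

theorem pvMod_dvd_sub (a u v : Int) (ha : 0 < a) (h : PySem.Int.mod u a = PySem.Int.mod v a) :
    a ∣ u - v := by
  rw [PySem.Int.mod_eq_emod_of_pos (a := u) ha, PySem.Int.mod_eq_emod_of_pos (a := v) ha] at h
  exact Int.dvd_of_emod_eq_zero (Int.emod_eq_emod_iff_emod_sub_eq_zero.mp h)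

theorem pvMod_small (r a : Int) (h0 : 0 ≤ r) (h1 : r < a) : PySem.Int.mod r a = r := by
  rw [PySem.Int.mod_eq_emod_of_pos (a := r) (show (0:Int) < a by omega)]
  exact Int.emod_eq_of_lt h0 h1

/-- Pigeonhole shrinking: any multiset of elements of `pos` has a sub-sum with fewer than
`a` parts, no larger, and in the same residue class mod `a`. -/
theorem pvShrink (a : Int) (ha : 0 < a) (pos : List Int) (hpos : ∀ y ∈ pos, 0 < y) :
    ∀ k : Nat, ∀ L : List Int, L.length = k → (∀ y ∈ L, y ∈ pos) →
    ∃ L' : List Int, (∀ y ∈ L', y ∈ pos) ∧ L'.length + 1 ≤ a.toNat ∧ L'.sum ≤ L.sum ∧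
      PySem.Int.mod L'.sum a = PySem.Int.mod L.sum a := by
  intro k
  induction k using Nat.strong_induction_on with
  | _ k ih =>
    intro L hk hL
    by_cases hsmall : L.length + 1 ≤ a.toNat
    · exact ⟨L, hL, hsmall, le_refl _, rfl⟩
    · -- L.length ≥ a.toNat: two prefix sums share a residue
      have hcard : (Finset.range a.toNat).card < (Finset.range (L.length + 1)).card := by
        simp; omega
      obtain ⟨i, hi, j, hj, hne, hfij⟩ :=
        Finset.exists_ne_map_eq_of_card_lt_of_maps_to hcard
          (f := fun i => (PySem.Int.mod ((L.take i).sum) a).toNat)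
          (fun i _ => by
            have := pvMod_bounds ((L.take i).sum) a ha
            simp; omega)
      rw [Finset.mem_range] at hi hj
      -- wlog i < j
      obtain ⟨i, j, hij, hjlen, hmodeq⟩ :
          ∃ i j : Nat, i < j ∧ j ≤ L.length ∧
            PySem.Int.mod ((L.take i).sum) a = PySem.Int.mod ((L.take j).sum) a := by
        have hmods : PySem.Int.mod ((L.take i).sum) a = PySem.Int.mod ((L.take j).sum) a := by
          have b1 := pvMod_bounds ((L.take i).sum) a ha
          have b2 := pvMod_bounds ((L.take j).sum) a ha
          omega
        rcases Nat.lt_or_ge i j with h | h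
        · exact ⟨i, j, h, by omega, hmods⟩
        · exact ⟨j, i, by omega, by omega, hmods.symm⟩
      -- the removed middle segment
      set M : List Int := (L.take j).drop i with hM
      have htj : L.take j = L.take i ++ M := by
        conv_lhs => rw [← List.take_append_drop i (L.take j)]
        rw [hM, List.take_take, Nat.min_eq_left (by omega)]
      have hMlen : M.length = j - i := by
        rw [hM, List.length_drop, List.length_take]; omega
      have hMsub : ∀ y ∈ M, y ∈ L := by
        intro y hy
        exact List.mem_of_mem_take (List.mem_of_mem_drop (hM ▸ hy))
      have hMpos : 0 < M.sum := by
        apply List.sum_pos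
        · intro y hy; exact hpos y (hL y (hMsub y hy))
        · intro hnil; rw [hnil] at hMlen; simp at hMlen; omega
      have hMsum : M.sum = (L.take j).sum - (L.take i).sum := by
        rw [htj, List.sum_append]; ring
      have hMdvd : a ∣ M.sum := by
        rw [hMsum]
        exact pvMod_dvd_sub a _ _ ha hmodeq.symm
      -- L' = take i ++ drop j
      set L2 : List Int := L.take i ++ L.drop j with hL2
      have hLsplit : L = L.take i ++ M ++ L.drop j := by
        rw [← htj, List.take_append_drop]
      have hL2sum : L2.sum = L.sum - M.sum := by
        conv_rhs => rw [hLsplit]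
        rw [hL2]; simp [List.sum_append]; ring
      have hL2len : L2.length < L.length := by
        conv_rhs => rw [hLsplit]
        rw [hL2]; simp [List.length_append]; omega
      have hL2mem : ∀ y ∈ L2, y ∈ pos := by
        intro y hy
        rcases List.mem_append.mp (hL2 ▸ hy) with h | h
        · exact hL y (List.mem_of_mem_take h)
        · exact hL y (List.mem_of_mem_drop h)
      obtain ⟨L', hL'1, hL'2, hL'3, hL'4⟩ := ih L2.length (by omega) L2 rfl hL2mem
      refine ⟨L', hL'1, hL'2, by omega, ?_⟩
      rw [hL'4, hL2sum]
      exact pvMod_congr a _ _ ha (by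
        have : L.sum - M.sum - L.sum = -M.sum := by ring
        rw [this]; exact hMdvd.neg_right)

-- ===== B-side: machine invariants =====

/-- every defined entry of `w` is a representable, correctly-classed, nonnegative value -/
def pvInv (gs : List Int) (a : Int) (w : List (Option Int)) : Prop :=
  ∀ i : Nat, ∀ v : Int, w.getD i none = some v →
    pvRepI gs v = true ∧ PySem.Int.mod v a = (i : Int) ∧ 0 ≤ v

/-- `w'` pointwise refines `w`: every defined entry stays defined and does not increase -/
def pvDec (w' w : List (Option Int)) : Prop :=
  ∀ i : Nat, ∀ v : Int, w.getD i none = some v → ∃ v', w'.getD i none = some v' ∧ v' ≤ v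

/-- every sum of at most `k` elements of `pos` dominates the entry of its residue class -/
def pvCov (pos : List Int) (a : Int) (w : List (Option Int)) (k : Nat) : Prop :=
  ∀ L : List Int, (∀ y ∈ L, y ∈ pos) → L.length ≤ k →
    ∃ v, w.getD (PySem.Int.mod L.sum a).toNat none = some v ∧ v ≤ L.sum

theorem pvDec_refl (w : List (Option Int)) : pvDec w w :=
  fun i v h => ⟨v, h, le_refl v⟩

theorem pvDec_trans (w3 w2 w1 : List (Option Int)) (h32 : pvDec w3 w2) (h21 : pvDec w2 w1) :
    pvDec w3 w1 := by
  intro i v h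
  obtain ⟨v2, h2, hle2⟩ := h21 i v h
  obtain ⟨v3, h3, hle3⟩ := h32 i v2 h2
  exact ⟨v3, h3, le_trans hle3 hle2⟩

theorem pyGetD_toNat (w : List (Option Int)) (r : Int) (h0 : 0 ≤ r) :
    PySem.List.pyGetD w r none = w.getD r.toNat none := by
  conv_lhs => rw [show r = ((r.toNat : Nat) : Int) by omega]
  rw [PySem.List.pyGetD_natCast]

theorem getD_set (w : List (Option Int)) (j : Nat) (hj : j < w.length) (x : Option Int) (i : Nat) :
    (w.set j x).getD i none = if i = j then x else w.getD i none := by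
  rcases x with _ | v
  all_goals {
    rw [List.getD_eq_getElem?_getD, List.getD_eq_getElem?_getD, List.getElem?_set]
    split_ifs with h1 h2
    · subst h1; simp [hj]
    · omega
    · omega
    · rfl }

theorem pvBStep_length (a r v : Int) (st : List (Option Int) × Bool) (x : Int) :
    (pvBStep a r v st x).1.length = st.1.length := by
  unfold pvBStep
  rcases h : PySem.List.pyGetD st.1 (PySem.Int.mod (r + x) a) none with _ | u
  · simp [PySem.List.length_pySetD]
  · dsimp only
    split_ifs <;> simp [PySem.List.length_pySetD]

theorem pvBStep_dec (a r v : Int) (ha : 0 < a) (st : List (Option Int) × Bool) (x : Int) :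
    pvDec (pvBStep a r v st x).1 st.1 := by
  have hb := pvMod_bounds (r + x) a ha
  unfold pvBStep
  intro i u hu
  have hset : ∀ y : Option Int, PySem.List.pySetD st.1 (PySem.Int.mod (r + x) a) y
      = st.1.set (PySem.Int.mod (r + x) a).toNat y := fun y =>
    PySem.List.pySetD_of_nonneg st.1 y (by omega)
  by_cases hlen : (PySem.Int.mod (r + x) a).toNat < st.1.length
  · rcases h : PySem.List.pyGetD st.1 (PySem.Int.mod (r + x) a) none with _ | u0
    · simp only [hset, getD_set st.1 _ hlen]
      split_ifs with he
      · rw [pyGetD_toNat _ _ (by omega)] at h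
        rw [he] at hu
        rw [h] at hu
        exact absurd hu (by simp)
      · exact ⟨u, hu, le_refl u⟩
    · dsimp only
      split_ifs with hlt
      · simp only [hset, getD_set st.1 _ hlen]
        split_ifs with he
        · rw [pyGetD_toNat _ _ (by omega)] at h
          rw [he] at hu
          rw [h] at hu
          exact ⟨v + x, rfl, by simp at hu; omega⟩
        · exact ⟨u, hu, le_refl u⟩
      · exact ⟨u, hu, le_refl u⟩
  · rcases h : PySem.List.pyGetD st.1 (PySem.Int.mod (r + x) a) none with _ | u0
    · simp only [hset]
      rw [List.set_eq_of_length_le (by omega)]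
      exact ⟨u, hu, le_refl u⟩
    · dsimp only
      split_ifs with hlt
      · simp only [hset]
        rw [List.set_eq_of_length_le (by omega)]
        exact ⟨u, hu, le_refl u⟩
      · exact ⟨u, hu, le_refl u⟩

theorem pvBStep_dom (a r v : Int) (ha : 0 < a) (st : List (Option Int) × Bool) (x : Int)
    (hlen : (PySem.Int.mod (r + x) a).toNat < st.1.length) :
    ∃ u, (pvBStep a r v st x).1.getD (PySem.Int.mod (r + x) a).toNat none = some u ∧ u ≤ v + x := by
  have hb := pvMod_bounds (r + x) a ha
  have hset : ∀ y : Option Int, PySem.List.pySetD st.1 (PySem.Int.mod (r + x) a) y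
      = st.1.set (PySem.Int.mod (r + x) a).toNat y := fun y =>
    PySem.List.pySetD_of_nonneg st.1 y (by omega)
  unfold pvBStep
  rcases h : PySem.List.pyGetD st.1 (PySem.Int.mod (r + x) a) none with _ | u0
  · simp only [hset, getD_set st.1 _ hlen, if_pos rfl]
    exact ⟨v + x, rfl, le_refl _⟩
  · dsimp only
    split_ifs with hlt
    · simp only [hset, getD_set st.1 _ hlen, if_pos rfl]
      exact ⟨v + x, rfl, le_refl _⟩
    · rw [pyGetD_toNat _ _ (by omega)] at h
      exact ⟨u0, h, by omega⟩

theorem pvBStep_inv (gs : List Int) (a r v : Int) (ha : 0 < a) (st : List (Option Int) × Bool)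
    (x : Int) (hinv : pvInv gs a st.1) (hv : pvRepI gs v = true) (h0v : 0 ≤ v)
    (hvr : PySem.Int.mod v a = PySem.Int.mod r a) (hx : x ∈ gs) (hxpos : 0 < x) :
    pvInv gs a (pvBStep a r v st x).1 := by
  have hb := pvMod_bounds (r + x) a ha
  have hnewval : pvRepI gs (v + x) = true := pvRepI_add gs v x hv h0v hx hxpos
  have hnewmod : PySem.Int.mod (v + x) a = PySem.Int.mod (r + x) a :=
    pvMod_congr a (v + x) (r + x) ha (by
      have := pvMod_dvd_sub a v r ha hvr
      have h2 : v + x - (r + x) = v - r := by ring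
      rw [h2]; exact this)
  have hset : ∀ y : Option Int, PySem.List.pySetD st.1 (PySem.Int.mod (r + x) a) y
      = st.1.set (PySem.Int.mod (r + x) a).toNat y := fun y =>
    PySem.List.pySetD_of_nonneg st.1 y (by omega)
  have hwrite : ∀ hlen : (PySem.Int.mod (r + x) a).toNat < st.1.length,
      pvInv gs a (st.1.set (PySem.Int.mod (r + x) a).toNat (some (v + x))) := by
    intro hlen i u hu
    rw [getD_set st.1 _ hlen] at hu
    split_ifs at hu with he
    · cases hu
      refine ⟨hnewval, ?_, by omega⟩
      rw [hnewmod, he]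
      omega
    · exact hinv i u hu
  unfold pvBStep
  rcases h : PySem.List.pyGetD st.1 (PySem.Int.mod (r + x) a) none with _ | u0
  · simp only [hset]
    by_cases hlen : (PySem.Int.mod (r + x) a).toNat < st.1.length
    · exact hwrite hlen
    · rw [List.set_eq_of_length_le (by omega)]
      exact hinv
  · dsimp only
    split_ifs with hlt
    · simp only [hset]
      have hlen : (PySem.Int.mod (r + x) a).toNat < st.1.length := by
        by_contra hc
        rw [pyGetD_toNat _ _ (by omega)] at h
        rw [List.getD_eq_getElem?_getD, List.getElem?_eq_none (by omega)] at h
        exact absurd h (by simp)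
      exact hwrite hlen
    · exact hinv

-- inner fold (over pos) facts
theorem innerFold_length (a r v : Int) (pos : List Int) (st : List (Option Int) × Bool) :
    (pos.foldl (pvBStep a r v) st).1.length = st.1.length := by
  induction pos generalizing st with
  | nil => rfl
  | cons x t ih => rw [List.foldl_cons, ih, pvBStep_length]

theorem innerFold_dec (a r v : Int) (ha : 0 < a) (pos : List Int) (st : List (Option Int) × Bool) :
    pvDec (pos.foldl (pvBStep a r v) st).1 st.1 := by
  induction pos generalizing st with
  | nil => exact pvDec_refl _
  | cons x t ih =>
    rw [List.foldl_cons]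
    exact pvDec_trans _ _ _ (ih _) (pvBStep_dec a r v ha st x)

theorem innerFold_inv (gs : List Int) (a r v : Int) (ha : 0 < a) (pos : List Int)
    (hpos : ∀ y ∈ pos, y ∈ gs ∧ 0 < y) (st : List (Option Int) × Bool)
    (hinv : pvInv gs a st.1) (hv : pvRepI gs v = true) (h0v : 0 ≤ v)
    (hvr : PySem.Int.mod v a = PySem.Int.mod r a) :
    pvInv gs a (pos.foldl (pvBStep a r v) st).1 := by
  induction pos generalizing st with
  | nil => exact hinv
  | cons x t ih =>
    rw [List.foldl_cons]
    have hx := hpos x (List.mem_cons_self ..)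
    exact ih (fun y hy => hpos y (List.mem_cons_of_mem _ hy)) _
      (pvBStep_inv gs a r v ha st x hinv hv h0v hvr hx.1 hx.2)

theorem innerFold_dom (a r v : Int) (ha : 0 < a) (pos : List Int) (st : List (Option Int) × Bool)
    (x : Int) (hx : x ∈ pos) (hlen : st.1.length = a.toNat) :
    ∃ u, (pos.foldl (pvBStep a r v) st).1.getD (PySem.Int.mod (r + x) a).toNat none = some u ∧
      u ≤ v + x := by
  obtain ⟨P, Q, rfl⟩ := List.append_of_mem hx
  rw [List.foldl_append, List.foldl_cons]
  have hb := pvMod_bounds (r + x) a ha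
  have hlenP : (P.foldl (pvBStep a r v) st).1.length = a.toNat := by
    rw [innerFold_length]; exact hlen
  obtain ⟨u, hu, hule⟩ := pvBStep_dom a r v ha (P.foldl (pvBStep a r v) st) x (by omega)
  obtain ⟨u', hu', hule'⟩ := innerFold_dec a r v ha Q _ _ u hu
  exact ⟨u', hu', le_trans hule' hule⟩

-- middle fold (over a list of residues) facts
theorem midFold_length (a : Int) (pos : List Int) (rs : List Int) (st : List (Option Int) × Bool) :
    (rs.foldl (pvBMid a pos) st).1.length = st.1.length := by
  induction rs generalizing st with
  | nil => rfl
  | cons r t ih =>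
    rw [List.foldl_cons, ih]
    unfold pvBMid
    rcases PySem.List.pyGetD st.1 r none with _ | v
    · rfl
    · exact innerFold_length ..

theorem midFold_dec (a : Int) (ha : 0 < a) (pos : List Int) (rs : List Int)
    (st : List (Option Int) × Bool) : pvDec (rs.foldl (pvBMid a pos) st).1 st.1 := by
  induction rs generalizing st with
  | nil => exact pvDec_refl _
  | cons r t ih =>
    rw [List.foldl_cons]
    refine pvDec_trans _ _ _ (ih _) ?_
    unfold pvBMid
    rcases PySem.List.pyGetD st.1 r none with _ | v
    · exact pvDec_refl _
    · exact innerFold_dec a r v ha pos st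

theorem midFold_inv (gs : List Int) (a : Int) (ha : 0 < a) (pos : List Int)
    (hpos : ∀ y ∈ pos, y ∈ gs ∧ 0 < y) (rs : List Int) (hrs : ∀ r ∈ rs, 0 ≤ r ∧ r < a)
    (st : List (Option Int) × Bool) (hinv : pvInv gs a st.1) :
    pvInv gs a (rs.foldl (pvBMid a pos) st).1 := by
  induction rs generalizing st with
  | nil => exact hinv
  | cons r t ih =>
    rw [List.foldl_cons]
    refine ih (fun r' hr' => hrs r' (List.mem_cons_of_mem _ hr')) _ ?_
    have hr := hrs r (List.mem_cons_self ..)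
    unfold pvBMid
    rcases h : PySem.List.pyGetD st.1 r none with _ | v
    · exact hinv
    · rw [pyGetD_toNat _ _ (by omega)] at h
      obtain ⟨hrep, hmod, h0v⟩ := hinv r.toNat v h
      exact innerFold_inv gs a r v ha pos hpos st hinv hrep h0v (by
        rw [hmod, pvMod_small r a (by omega) (by omega)]; omega)

-- 'changed' flag false means nothing was written
theorem pvBStep_false (a r v : Int) (st : List (Option Int) × Bool) (x : Int)
    (h : (pvBStep a r v st x).2 = false) : pvBStep a r v st x = st := by
  unfold pvBStep at h ⊢
  generalize PySem.List.pyGetD st.1 (PySem.Int.mod (r + x) a) none = q at h ⊢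
  rcases q with _ | u
  · exact absurd h (by simp)
  · dsimp only at h ⊢
    by_cases hlt : v + x < u
    · rw [if_pos hlt] at h
      exact absurd h (by simp)
    · rw [if_neg hlt]

theorem foldl_false {α : Type} (f : (List (Option Int) × Bool) → α → (List (Option Int) × Bool))
    (hf : ∀ st x, (f st x).2 = false → f st x = st) :
    ∀ (l : List α) (st : List (Option Int) × Bool),
      (l.foldl f st).2 = false → l.foldl f st = st := by
  intro l
  induction l with
  | nil => intro st _; rfl
  | cons x t ih =>
    intro st h
    rw [List.foldl_cons] at h ⊢
    have h1 := ih (f st x) h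
    rw [h1] at h ⊢
    exact hf st x h

theorem pvBMid_false (a : Int) (pos : List Int) (st : List (Option Int) × Bool) (r : Int)
    (h : (pvBMid a pos st r).2 = false) : pvBMid a pos st r = st := by
  unfold pvBMid at h ⊢
  generalize PySem.List.pyGetD st.1 r none = q at h ⊢
  rcases q with _ | v
  · rfl
  · exact foldl_false _ (pvBStep_false a r v) pos st h

theorem pvBRound_false (a : Int) (pos : List Int) (w : List (Option Int))
    (h : (pvBRound a pos w).2 = false) : (pvBRound a pos w).1 = w := by
  unfold pvBRound at h ⊢
  rw [foldl_false _ (pvBMid_false a pos) _ _ h]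

-- coverage advances by one per round
theorem round_cov (gs : List Int) (a : Int) (ha : 0 < a) (pos : List Int)
    (hpos : ∀ y ∈ pos, y ∈ gs ∧ 0 < y) (w : List (Option Int)) (hlen : w.length = a.toNat)
    (k : Nat) (hcov : pvCov pos a w k) : pvCov pos a (pvBRound a pos w).1 (k + 1) := by
  intro L hLmem hLlen
  rcases Nat.lt_or_ge L.length (k + 1) with hcase | hcase
  · -- length ≤ k: already covered, rounds only refine
    obtain ⟨v, hv, hvle⟩ := hcov L hLmem (by omega)
    obtain ⟨v', hv', hvle'⟩ := midFold_dec a ha pos _ (w, false) _ v hv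
    exact ⟨v', hv', le_trans hvle' hvle⟩
  · -- length = k + 1: peel the last part
    rcases List.eq_nil_or_concat L with rfl | ⟨L', x, rfl⟩
    · simp at hcase
    rw [List.concat_eq_append] at hLmem hLlen hcase ⊢
    have hL'len : L'.length = k := by
      rw [List.length_append] at hLlen hcase; simp at hLlen hcase; omega
    have hL'mem : ∀ y ∈ L', y ∈ pos := fun y hy => hLmem y (List.mem_append_left _ hy)
    have hxmem : x ∈ pos := hLmem x (List.mem_append_right _ (List.mem_cons_self ..))
    have hsum : (L' ++ [x]).sum = L'.sum + x := by rw [List.sum_append]; simp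
    obtain ⟨v0, hv0, hv0le⟩ := hcov L' hL'mem (by omega)
    set r : Int := PySem.Int.mod L'.sum a with hr
    have hrb := pvMod_bounds L'.sum a ha
    -- split the round's range at r
    have hsplit : PySem.List.pyRange 0 a 1
        = PySem.List.pyRange 0 r 1 ++ (r :: PySem.List.pyRange (r + 1) a 1) := by
      rw [PySem.List.pyRange_one_append 0 r a (by omega) (by omega)]
      congr 1
      exact PySem.List.pyRange_one_cons (show r < a by omega)
    unfold pvBRound
    rw [hsplit, List.foldl_append, List.foldl_cons]
    set stP := (PySem.List.pyRange 0 r 1).foldl (pvBMid a pos) (w, false) with hstP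
    have hstPlen : stP.1.length = a.toNat := by rw [hstP, midFold_length]; exact hlen
    obtain ⟨v', hv', hv'le⟩ := midFold_dec a ha pos (PySem.List.pyRange 0 r 1) (w, false)
      r.toNat v0 hv0
    have hread : PySem.List.pyGetD stP.1 r none = some v' := by
      rw [pyGetD_toNat _ _ (by omega)]; exact hv'
    have hmid : pvBMid a pos stP r = pos.foldl (pvBStep a r v') stP := by
      unfold pvBMid
      rw [hread]
    rw [hmid]
    obtain ⟨u, hu, hule⟩ := innerFold_dom a r v' ha pos stP x hxmem hstPlen
    obtain ⟨u', hu', hule'⟩ := midFold_dec a ha pos (PySem.List.pyRange (r + 1) a 1) _ _ u hu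
    have hidx : PySem.Int.mod (L' ++ [x]).sum a = PySem.Int.mod (r + x) a := by
      rw [hsum]
      exact pvMod_congr a _ _ ha (by
        have := pvMod_dvd_sub a L'.sum r ha (by rw [hr, pvMod_small r a (by omega) (by omega)])
        have h2 : L'.sum + x - (r + x) = L'.sum - r := by ring
        rw [h2]; exact this)
    rw [hidx]
    exact ⟨u', hu', by rw [hsum]; omega⟩

theorem round_inv (gs : List Int) (a : Int) (ha : 0 < a) (pos : List Int)
    (hpos : ∀ y ∈ pos, y ∈ gs ∧ 0 < y) (w : List (Option Int)) (hinv : pvInv gs a w) :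
    pvInv gs a (pvBRound a pos w).1 :=
  midFold_inv gs a ha pos hpos _ (fun r hr => by
    have := (PySem.List.mem_pyRange_one ..).mp hr
    omega) (w, false) hinv

theorem round_length (a : Int) (pos : List Int) (w : List (Option Int)) :
    (pvBRound a pos w).1.length = w.length := midFold_length ..

-- a fixpoint of the round covers everything any number of further rounds would
theorem fix_cov (gs : List Int) (a : Int) (ha : 0 < a) (pos : List Int)
    (hpos : ∀ y ∈ pos, y ∈ gs ∧ 0 < y) (w : List (Option Int)) (hlen : w.length = a.toNat)
    (hfix : (pvBRound a pos w).1 = w) (k : Nat) (hcov : pvCov pos a w k) :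
    ∀ m : Nat, pvCov pos a w (k + m) := by
  intro m
  induction m with
  | zero => exact hcov
  | succ m ih =>
    have := round_cov gs a ha pos hpos w hlen (k + m) ih
    rw [hfix] at this
    exact fun L h1 h2 => this L h1 (by omega)

theorem rounds_all (gs : List Int) (a : Int) (ha : 0 < a) (pos : List Int)
    (hpos : ∀ y ∈ pos, y ∈ gs ∧ 0 < y) :
    ∀ (fuel : List Int) (w : List (Option Int)) (k : Nat), w.length = a.toNat →
      pvInv gs a w → pvCov pos a w k →
      (pvBRounds a pos fuel w).length = a.toNat ∧ pvInv gs a (pvBRounds a pos fuel w) ∧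
        pvCov pos a (pvBRounds a pos fuel w) (k + fuel.length) := by
  intro fuel
  induction fuel with
  | nil => intro w k h1 h2 h3; exact ⟨h1, h2, by simpa using h3⟩
  | cons f rest ih =>
    intro w k h1 h2 h3
    have heq : pvBRounds a pos (f :: rest) w
        = if (pvBRound a pos w).2 then pvBRounds a pos rest (pvBRound a pos w).1
          else (pvBRound a pos w).1 := rfl
    rw [heq]
    have hrc := round_cov gs a ha pos hpos w h1 k h3
    have hri := round_inv gs a ha pos hpos w h2
    have hrl : (pvBRound a pos w).1.length = a.toNat := by rw [round_length]; exact h1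
    by_cases hflag : (pvBRound a pos w).2 = true
    · rw [if_pos hflag]
      obtain ⟨c1, c2, c3⟩ := ih (pvBRound a pos w).1 (k + 1) hrl hri hrc
      refine ⟨c1, c2, fun L hm hl => c3 L hm (by simp at hl ⊢; omega)⟩
    · rw [if_neg hflag]
      have hfix : (pvBRound a pos w).1 = w :=
        pvBRound_false a pos w (by simpa using hflag)
      rw [hfix]
      refine ⟨h1, h2, ?_⟩
      have := fix_cov gs a ha pos hpos w h1 hfix k h3 (rest.length + 1)
      exact fun L hm hl => this L hm (by simp at hl ⊢; omega)

-- ===== B-side: the gap test agrees with representability =====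

theorem gap_test (gens : List Int) (n a : Int) (ha : 0 < a) (han : a ∈ gens)
    (pos : List Int) (hposdef : pos = gens.filter (fun x => decide (0 < x) && decide (x ≤ n)))
    (w : List (Option Int)) (hinv : pvInv gens a w)
    (hcov : pvCov pos a w ((a - 1).toNat)) (m : Int) (h1 : 1 ≤ m) (h2 : m ≤ n) :
    (match PySem.List.pyGetD w (PySem.Int.mod m a) none with
      | none => true
      | some v => decide (m < v)) = ! pvRepI gens m := by
  have hb := pvMod_bounds m a ha
  have hposP : ∀ y ∈ pos, 0 < y ∧ y ≤ n ∧ y ∈ gens := by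
    intro y hy
    rw [hposdef] at hy
    obtain ⟨hyg, hyc⟩ := List.mem_filter.mp hy
    simp at hyc
    exact ⟨hyc.1, hyc.2, hyg⟩
  rw [pyGetD_toNat _ _ (by omega)]
  by_cases hrep : pvRepI gens m = true
  · -- representable: the entry is defined and ≤ m
    obtain ⟨L, hLmem, hLsum⟩ :=
      sums_of_pvRepI gens n m.toNat m rfl (by omega) h2 hrep
    have hLpos : ∀ y ∈ L, y ∈ pos := by
      intro y hy
      obtain ⟨hg, h0, hn⟩ := hLmem y hy
      rw [hposdef]
      exact List.mem_filter.mpr ⟨hg, by simp; omega⟩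
    obtain ⟨L', hL'mem, hL'len, hL'sum, hL'mod⟩ :=
      pvShrink a ha pos (fun y hy => (hposP y hy).1) L.length L rfl hLpos
    obtain ⟨v, hv, hvle⟩ := hcov L' hL'mem (by omega)
    rw [hL'mod, hLsum] at hv
    rw [hv]
    simp only [hrep]
    simp
    omega
  · -- not representable: the entry, if defined, exceeds m
    simp only [Bool.not_eq_true] at hrep
    rw [hrep]
    rcases hread : w.getD (PySem.Int.mod m a).toNat none with _ | v
    · rfl
    · obtain ⟨hvrep, hvmod, hv0⟩ := hinv _ v hread
      simp only [Bool.not_false]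
      simp only [decide_eq_true_eq]
      by_contra hc
      rw [not_lt] at hc
      -- v ≤ m, v ≡ m (mod a): m = v + t·a is representable, contradiction
      have hmod : PySem.Int.mod v a = PySem.Int.mod m a := by
        rw [hvmod]; omega
      obtain ⟨t, ht⟩ := pvMod_dvd_sub a m v ha (by rw [hmod])
      have ht0 : 0 ≤ t := by nlinarith
      have htt : (t.toNat : Int) = t := by omega
      have : pvRepI gens (v + t.toNat * a) = true :=
        pvRepI_add_mul gens v a hvrep hv0 han ha t.toNat
      rw [show v + (t.toNat : Int) * a = m by rw [htt, mul_comm]; linarith] at this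
      rw [this] at hrep
      exact absurd hrep (by simp)

-- no positive generator ≤ n: nothing in [1..n] is representable
theorem norep_of_no_pos (gens : List Int) (n : Int)
    (hpos : gens.filter (fun x => decide (0 < x) && decide (x ≤ n)) = []) :
    ∀ m : Int, 1 ≤ m → m ≤ n → pvRepI gens m = false := by
  intro m h1 h2
  by_contra hc
  rw [Bool.not_eq_false] at hc
  obtain ⟨g, hg, hg1, hg2, _⟩ := (pvRepI_iff gens m h1).mp hc
  have : g ∈ gens.filter (fun x => decide (0 < x) && decide (x ≤ n)) :=
    List.mem_filter.mpr ⟨hg, by simp; omega⟩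
  rw [hpos] at this
  exact absurd this (by simp)

-- the clamped bound does not change the candidate range
theorem range_clamp (U : Int) :
    PySem.List.pyRange 1 (U + 1) 1 = PySem.List.pyRange 1 ((if U > 0 then U else 0) + 1) 1 := by
  split_ifs with h
  · rfl
  · rw [PySem.List.pyRange_one_eq_nil (by omega), PySem.List.pyRange_one_eq_nil (by omega)]

-- ===== VERDICT (by name: the statement is the Claim_ definition above) =====
theorem compute_semigroup_gaps_spec : Claim_equal_compute_semigroup_gaps := by
  intro generators up_to _
  show compute_semigroup_gaps generators up_to = compute_semigroup_gaps_alt generators up_to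
  simp only [compute_semigroup_gaps, compute_semigroup_gaps_alt]
  rw [gcd_fold_sorted]
  by_cases hg : generators.foldl (fun a b => (Int.gcd a b : Int)) 0 = 1
  case neg => rw [if_pos hg, if_pos hg]
  rw [if_neg (fun h => h hg), if_neg (fun h => h hg)]
  have hne : generators ≠ [] := by
    intro h
    rw [gcd_fold_ne_zero_of_nil generators h] at hg
    omega
  -- align the bound U between the two sides
  have hbound : ∀ U : Int,
      (let upTo := U
       let reachable : PySem.Set Int :=
        (PySem.List.pyRange 1 (upTo + 1) 1).foldl
          (fun r target => pvAInner r target (PySem.List.sorted generators (fun x => x) false))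
          (PySem.Set.ofList [0])
       let gaps := PySem.List.sorted
        (PySem.Set.diff (PySem.Set.ofList (PySem.List.pyRange 1 (upTo + 1) 1)) reachable)
        (fun x => x) false
       let frobenius : Int := match PySem.List.max? gaps (fun x => x) with
        | some m => m
        | none => -1
       ((some gaps, some frobenius, some (gaps.length : Int))
         : Option (List Int) × Option Int × Option Int))
      = (let n : Int := if U > 0 then U else 0
         let pos := generators.filter (fun x => decide (0 < x) && decide (x ≤ n))
         if pos = [] then
           let gaps := PySem.List.pyRange 1 (n + 1) 1
           let frobenius : Int := match PySem.List.pyGet? gaps (-1) with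
             | some m => m | none => -1
           ((some gaps, some frobenius, some (gaps.length : Int))
             : Option (List Int) × Option Int × Option Int)
         else
           let a : Int := (PySem.List.min? pos (fun x => x)).getD 0
           let w0 : List (Option Int) := (List.replicate a.toNat (none : Option Int)).set 0 (some 0)
           let w := pvBRounds a pos (PySem.List.pyRange 0 (a - 1) 1) w0
           let gaps := (PySem.List.pyRange 1 (n + 1) 1).filter (fun m =>
             match PySem.List.pyGetD w (PySem.Int.mod m a) none with
             | none => true
             | some v => decide (m < v))
           let frobenius : Int := match PySem.List.pyGet? gaps (-1) with
             | some m => m | none => -1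
           ((some gaps, some frobenius, some (gaps.length : Int))
             : Option (List Int) × Option Int × Option Int)) := by
    intro U
    simp only
    set n : Int := if U > 0 then U else 0 with hn
    have hn0 : 0 ≤ n := by rw [hn]; split_ifs <;> omega
    set pos := generators.filter (fun x => decide (0 < x) && decide (x ≤ n)) with hposdef
    rw [gapsA_eq generators U, range_clamp U, ← hn]
    by_cases hpos : pos = []
    · rw [if_pos hpos]
      have hAfull : (PySem.List.pyRange 1 (n + 1) 1).filter (fun m => ! pvRepI generators m)
          = PySem.List.pyRange 1 (n + 1) 1 := by
        apply List.filter_eq_self.mpr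
        intro m hm
        have := (PySem.List.mem_pyRange_one ..).mp hm
        rw [norep_of_no_pos generators n (hposdef ▸ hpos) m this.1 (by omega)]
        rfl
      rw [hAfull]
      have hfro : PySem.List.max? (PySem.List.pyRange 1 (n + 1) 1) (fun x => x)
          = PySem.List.pyGet? (PySem.List.pyRange 1 (n + 1) 1) (-1) :=
        max_eq_last _ (PySem.List.pairwise_lt_pyRange_one 1 (n + 1))
      rw [hfro]
    · rw [if_neg hpos]
      obtain ⟨a, hamin⟩ : ∃ a, PySem.List.min? pos (fun x => x) = some a := by
        rcases hmin : PySem.List.min? pos (fun x => x) with _ | a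
        · exact absurd ((PySem.List.min?_eq_none_iff ..).mp hmin) hpos
        · exact ⟨a, rfl⟩
      rw [hamin]
      simp only [Option.getD_some]
      have haP : a ∈ pos := PySem.List.min?_mem hamin
      have hposP : ∀ y ∈ pos, 0 < y ∧ y ≤ n ∧ y ∈ generators := by
        intro y hy
        rw [hposdef] at hy
        obtain ⟨hyg, hyc⟩ := List.mem_filter.mp hy
        simp at hyc
        exact ⟨hyc.1, hyc.2, hyg⟩
      have ha : 0 < a := (hposP a haP).1
      have hagen : a ∈ generators := (hposP a haP).2.2
      -- the initial array
      set w0 : List (Option Int) := (List.replicate a.toNat (none : Option Int)).set 0 (some 0)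
        with hw0
      have hw0len : w0.length = a.toNat := by rw [hw0]; simp
      have hw0inv : pvInv generators a w0 := by
        intro i v hv
        rw [hw0, getD_set _ _ (by simp; omega)] at hv
        split_ifs at hv with he
        · cases hv
          refine ⟨pvRepI_zero _, ?_, le_refl 0⟩
          rw [he, pvMod_small 0 a (le_refl 0) ha]
          simp
        · rw [List.getD_eq_getElem?_getD] at hv
          rcases Nat.lt_or_ge i a.toNat with hi | hi
          · rw [List.getElem?_eq_getElem (by simpa using hi)] at hv
            simp at hv
          · rw [List.getElem?_eq_none (by simpa using hi)] at hv
            exact absurd hv (by simp)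
      have hw0cov : pvCov pos a w0 0 := by
        intro L hLmem hLlen
        have : L = [] := List.eq_nil_of_length_eq_zero (by omega)
        subst this
        refine ⟨0, ?_, le_refl 0⟩
        simp only [List.sum_nil]
        rw [pvMod_small 0 a (le_refl 0) ha]
        rw [hw0, getD_set _ _ (by simp; omega)]
        simp
      obtain ⟨_, hwinv, hwcov⟩ := rounds_all generators a ha pos
        (fun y hy => ⟨(hposP y hy).2.2, (hposP y hy).1⟩)
        (PySem.List.pyRange 0 (a - 1) 1) w0 0 hw0len hw0inv hw0cov
      have hfuellen : (PySem.List.pyRange 0 (a - 1) 1).length = (a - 1).toNat := by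
        rw [PySem.List.length_pyRange_one]
        congr 1
        omega
      rw [hfuellen] at hwcov
      have hBgaps : (PySem.List.pyRange 1 (n + 1) 1).filter (fun m =>
          match PySem.List.pyGetD (pvBRounds a pos (PySem.List.pyRange 0 (a - 1) 1) w0)
              (PySem.Int.mod m a) none with
          | none => true
          | some v => decide (m < v))
          = (PySem.List.pyRange 1 (n + 1) 1).filter (fun m => ! pvRepI generators m) := by
        apply List.filter_congr
        intro m hm
        have hmr := (PySem.List.mem_pyRange_one ..).mp hm
        exact gap_test generators n a ha hagen pos hposdef
          (pvBRounds a pos (PySem.List.pyRange 0 (a - 1) 1) w0) hwinv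
          (fun L h1 h2 => hwcov L h1 (by omega)) m hmr.1 (by omega)
      rw [hBgaps, max_eq_last_filter]
  cases up_to with
  | none =>
    simp only
    rw [sorted_head_min generators hne, sorted_last_max generators hne]
    exact hbound _
  | some u =>
    simp only
    exact hbound u
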